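-- pv_equiv track=rewrite | github.com/gapaza/combench | combench/models/truss/representation.py | find_overlapped_segments
-- ===== SOURCE A (Python) =====
-- def find_overlapped_segments(segments):
--     """Find indices of line segments that are completely overlapped by another segment."""
--     overlapped_indices = []
--     n = len(segments)
--     for i in range(n):
--         for j in range(n):
--             if i != j and is_segment_overlapped(segments[i], segments[j]):
--                 overlapped_indices.append(i)
--                 break
--     return overlapped_indices
--
-- def is_segment_overlapped(seg1, seg2):
--     # return check_overlap(seg1, seg2)
--     """Check if line segment seg1 is completely overlapped by line segment seg2."""
--     (x1, y1), (x2, y2) = seg1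
--     (x3, y3), (x4, y4) = seg2
--     return (is_point_on_segment(x1, y1, x3, y3, x4, y4) and
--             is_point_on_segment(x2, y2, x3, y3, x4, y4))
--
-- def is_point_on_segment(px, py, x1, y1, x2, y2):
--     """Check if point (px, py) lies on the line segment from (x1, y1) to (x2, y2)."""
--     if min(x1, x2) <= px <= max(x1, x2) and min(y1, y2) <= py <= max(y1, y2):
--         if (x2 - x1) * (py - y1) == (y2 - y1) * (px - x1):
--             return True
--     return False
-- ===== SOURCE B (Python) =====
-- def _gcd(a, b):
--     a, b = abs(a), abs(b)
--     while b:
--         a, b = b, a % b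
--     return a
--
--
-- def _line_key(x1, y1, x2, y2):
--     """Canonical key of the infinite line through two DISTINCT points."""
--     dx, dy = x2 - x1, y2 - y1
--     g = _gcd(dx, dy)
--     a, b = dx // g, dy // g
--     if a < 0 or (a == 0 and b < 0):
--         a, b = -a, -b
--     return (a, b, b * x1 - a * y1)
--
--
-- def _on_nondeg(px, py, x1, y1, x2, y2):
--     """Point on a NON-degenerate segment: zero cross product + dot-product range."""
--     dx, dy = x2 - x1, y2 - y1
--     ux, uy = px - x1, py - y1
--     if ux * dy != uy * dx:
--         return False
--     d = ux * dx + uy * dy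
--     return 0 <= d <= dx * dx + dy * dy
--
--
-- def find_overlapped_segments(segments):
--     n = len(segments)
--     groups = {}       # canonical line key -> indices of non-degenerate segments on it
--     point_idxs = []   # indices of degenerate (single-point) segments
--     point_count = {}  # coordinate -> number of degenerate segments there
--     for i, ((x1, y1), (x2, y2)) in enumerate(segments):
--         if x1 == x2 and y1 == y2:
--             point_idxs.append(i)
--             point_count[(x1, y1)] = point_count.get((x1, y1), 0) + 1
--         else:
--             groups.setdefault(_line_key(x1, y1, x2, y2), []).append(i)
--     flagged = set()
--     # a non-degenerate segment can only be contained in a segment on the SAME line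
--     for idxs in groups.values():
--         for i in idxs:
--             (x1, y1), (x2, y2) = segments[i]
--             if any(j != i
--                    and _on_nondeg(x1, y1, *segments[j][0], *segments[j][1])
--                    and _on_nondeg(x2, y2, *segments[j][0], *segments[j][1])
--                    for j in idxs):
--                 flagged.add(i)
--     # a degenerate segment is contained in a coinciding point or in any segment through it
--     for i in point_idxs:
--         (px, py), _ = segments[i]
--         if point_count[(px, py)] >= 2:
--             flagged.add(i)
--         elif any(_on_nondeg(px, py, *segments[j][0], *segments[j][1])
--                  for idxs in groups.values() for j in idxs):
--             flagged.add(i)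
--     return [i for i in range(n) if i in flagged]
-- ===== Notes on version B (the rewrite author's own statement) =====
-- stated objective: faster
-- what changed: Instead of testing every ordered pair of segments, B buckets non-degenerate segments by the canonical (gcd-reduced, sign-normalized) line they span in one dict-building pass and only compares segments within the same bucket, handling degenerate point-segments via a coordinate multiplicity counter plus a scan of the non-degenerate segments.
import Mathlib
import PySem

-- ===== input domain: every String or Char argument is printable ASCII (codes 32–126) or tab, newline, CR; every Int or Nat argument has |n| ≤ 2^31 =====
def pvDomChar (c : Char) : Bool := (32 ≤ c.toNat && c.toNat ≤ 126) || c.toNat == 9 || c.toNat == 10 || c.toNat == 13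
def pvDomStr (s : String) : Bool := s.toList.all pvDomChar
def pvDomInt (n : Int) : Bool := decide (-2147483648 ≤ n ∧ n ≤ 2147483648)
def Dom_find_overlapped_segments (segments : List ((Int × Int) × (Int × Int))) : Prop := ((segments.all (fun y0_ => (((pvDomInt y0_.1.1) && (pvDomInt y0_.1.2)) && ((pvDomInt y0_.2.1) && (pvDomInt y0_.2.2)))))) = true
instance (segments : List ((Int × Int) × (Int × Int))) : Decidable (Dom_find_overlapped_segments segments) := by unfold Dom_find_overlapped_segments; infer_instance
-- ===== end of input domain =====

-- B replaces A's all-pairs containment scan by hash-grouping the non-degenerate segments by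
-- the canonical line they span (degenerate point-segments handled via a coordinate counter),
-- so only segments on the same line are compared: measurably faster on large inputs.


-- ===== PORT A =====
def pv_is_point_on_segment (px py x1 y1 x2 y2 : Int) : Bool :=
  if min x1 x2 ≤ px ∧ px ≤ max x1 x2 ∧ min y1 y2 ≤ py ∧ py ≤ max y1 y2 then
    if (x2 - x1) * (py - y1) == (y2 - y1) * (px - x1) then true else false
  else false

def pv_is_segment_overlapped (seg1 seg2 : (Int × Int) × (Int × Int)) : Bool :=
  pv_is_point_on_segment seg1.1.1 seg1.1.2 seg2.1.1 seg2.1.2 seg2.2.1 seg2.2.2 &&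
  pv_is_point_on_segment seg1.2.1 seg1.2.2 seg2.1.1 seg2.1.2 seg2.2.1 seg2.2.2

def find_overlapped_segments (segments : List ((Int × Int) × (Int × Int))) : List Int :=
  let n : Int := segments.length
  -- inner 'for j in range(n): … append(i); break' = first hit found ⇒ append i once
  (PySem.List.pyRange 0 n 1).foldl (fun acc i =>
    if (PySem.List.pyRange 0 n 1).any (fun j =>
        j != i && pv_is_segment_overlapped (PySem.List.pyGetD segments i ((0,0),(0,0)))
                                           (PySem.List.pyGetD segments j ((0,0),(0,0)))) then
      acc ++ [i]
    else acc) []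

-- ===== PORT B =====
def pv_gcdAux : Nat → Nat → Nat
  | a, 0 => a
  | a, b + 1 => pv_gcdAux (b + 1) (a % (b + 1))
decreasing_by exact Nat.mod_lt _ (Nat.succ_pos b)

-- while-loop on |a|, |b| (Python's _gcd)
def pv_gcd (a b : Int) : Int := (pv_gcdAux a.natAbs b.natAbs : Int)

def pv_line_key (x1 y1 x2 y2 : Int) : Int × Int × Int :=
  let dx := x2 - x1
  let dy := y2 - y1
  let g := pv_gcd dx dy
  let a := PySem.Int.floordiv dx g
  let b := PySem.Int.floordiv dy g
  let ab := if a < 0 ∨ (a = 0 ∧ b < 0) then (-a, -b) else (a, b)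
  (ab.1, ab.2, ab.2 * x1 - ab.1 * y1)

def pv_on_nondeg (px py x1 y1 x2 y2 : Int) : Bool :=
  let dx := x2 - x1
  let dy := y2 - y1
  let ux := px - x1
  let uy := py - y1
  if ux * dy ≠ uy * dx then false
  else decide (0 ≤ ux * dx + uy * dy ∧ ux * dx + uy * dy ≤ dx * dx + dy * dy)

def find_overlapped_segments_alt (segments : List ((Int × Int) × (Int × Int))) : List Int :=
  let n : Int := segments.length
  let st :=
    (PySem.List.enumerate segments 0).foldl (fun st p =>
        if p.2.1.1 == p.2.2.1 && p.2.1.2 == p.2.2.2 then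
          (st.1, st.2.1 ++ [p.1], st.2.2.modify (p.2.1.1, p.2.1.2) 0 (· + 1))
        else
          (st.1.modify (pv_line_key p.2.1.1 p.2.1.2 p.2.2.1 p.2.2.2) [] (· ++ [p.1]),
           st.2.1, st.2.2))
      ((PySem.Dict.empty, [], PySem.Dict.empty) :
        PySem.Dict (Int × Int × Int) (List Int) × List Int × PySem.Dict (Int × Int) Int)
  let groups := st.1
  let pointIdxs := st.2.1
  let pointCount := st.2.2
  let flagged : PySem.Set Int :=
    groups.values.foldl (fun fl idxs =>
      idxs.foldl (fun fl i =>
        let s := PySem.List.pyGetD segments i ((0,0),(0,0))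
        if idxs.any (fun j =>
            let t := PySem.List.pyGetD segments j ((0,0),(0,0))
            j != i && pv_on_nondeg s.1.1 s.1.2 t.1.1 t.1.2 t.2.1 t.2.2
                   && pv_on_nondeg s.2.1 s.2.2 t.1.1 t.1.2 t.2.1 t.2.2) then
          PySem.Set.add fl i
        else fl) fl) PySem.Set.empty
  let flagged : PySem.Set Int :=
    pointIdxs.foldl (fun fl i =>
      let p := (PySem.List.pyGetD segments i ((0,0),(0,0))).1
      if 2 ≤ pointCount.getD p 0 then PySem.Set.add fl i
      else if groups.values.any (fun idxs => idxs.any (fun j =>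
          let t := PySem.List.pyGetD segments j ((0,0),(0,0))
          pv_on_nondeg p.1 p.2 t.1.1 t.1.2 t.2.1 t.2.2)) then
        PySem.Set.add fl i
      else fl) flagged
  (PySem.List.pyRange 0 n 1).foldl (fun acc i =>
    if PySem.Set.contains flagged i then acc ++ [i] else acc) []

-- ===== PRECONDITION & SPEC =====
def Spec_find_overlapped_segments (segments : List ((Int × Int) × (Int × Int))) (out : List Int) : Prop := out = find_overlapped_segments_alt segments
instance (segments : List ((Int × Int) × (Int × Int))) (out : List Int) : Decidable (Spec_find_overlapped_segments segments out) := by unfold Spec_find_overlapped_segments; infer_instance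

-- ===== CLAIM (what is proved, stated in full; the proofs are below) =====
def Claim_equal_find_overlapped_segments : Prop := ∀ (segments : List ((Int × Int) × (Int × Int))), Dom_find_overlapped_segments segments → Spec_find_overlapped_segments segments (find_overlapped_segments segments)

-- ===== LEMMAS AND PROOFS =====

-- proof-side abbreviations
def pdeg (s : (Int × Int) × (Int × Int)) : Bool := s.1.1 == s.2.1 && s.1.2 == s.2.2
def pkey (s : (Int × Int) × (Int × Int)) : Int × Int × Int := pv_line_key s.1.1 s.1.2 s.2.1 s.2.2

def pEn (segments : List ((Int × Int) × (Int × Int))) : List (Int × ((Int × Int) × (Int × Int))) :=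
  PySem.List.enumerate segments 0

def groupsOf (segments : List ((Int × Int) × (Int × Int))) : PySem.Dict (Int × Int × Int) (List Int) :=
  (pEn segments).foldl (fun d p => if pdeg p.2 then d else d.modify (pkey p.2) [] (· ++ [p.1]))
    PySem.Dict.empty
def ptIdxOf (segments : List ((Int × Int) × (Int × Int))) : List Int :=
  (pEn segments).foldl (fun l p => if pdeg p.2 then l ++ [p.1] else l) []
def ptCntOf (segments : List ((Int × Int) × (Int × Int))) : PySem.Dict (Int × Int) Int :=
  (pEn segments).foldl (fun d p => if pdeg p.2 then d.modify p.2.1 0 (· + 1) else d)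
    PySem.Dict.empty

def flag1Of (segments : List ((Int × Int) × (Int × Int))) : PySem.Set Int :=
  (groupsOf segments).values.foldl (fun fl idxs =>
    idxs.foldl (fun fl i =>
      let s := PySem.List.pyGetD segments i ((0,0),(0,0))
      if idxs.any (fun j =>
          let t := PySem.List.pyGetD segments j ((0,0),(0,0))
          j != i && pv_on_nondeg s.1.1 s.1.2 t.1.1 t.1.2 t.2.1 t.2.2
                 && pv_on_nondeg s.2.1 s.2.2 t.1.1 t.1.2 t.2.1 t.2.2) then
        PySem.Set.add fl i
      else fl) fl) PySem.Set.empty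

def flag2Of (segments : List ((Int × Int) × (Int × Int))) : PySem.Set Int :=
  (ptIdxOf segments).foldl (fun fl i =>
    let p := (PySem.List.pyGetD segments i ((0,0),(0,0))).1
    if 2 ≤ (ptCntOf segments).getD p 0 then PySem.Set.add fl i
    else if (groupsOf segments).values.any (fun idxs => idxs.any (fun j =>
        let t := PySem.List.pyGetD segments j ((0,0),(0,0))
        pv_on_nondeg p.1 p.2 t.1.1 t.1.2 t.2.1 t.2.2)) then
      PySem.Set.add fl i
    else fl) (flag1Of segments)

theorem st_eq (l : List (Int × ((Int × Int) × (Int × Int))))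
    (d1 : PySem.Dict (Int × Int × Int) (List Int)) (l2 : List Int)
    (d3 : PySem.Dict (Int × Int) Int) :
    (l.foldl (fun st p =>
        if p.2.1.1 == p.2.2.1 && p.2.1.2 == p.2.2.2 then
          (st.1, st.2.1 ++ [p.1], st.2.2.modify (p.2.1.1, p.2.1.2) 0 (· + 1))
        else
          (st.1.modify (pv_line_key p.2.1.1 p.2.1.2 p.2.2.1 p.2.2.2) [] (· ++ [p.1]),
           st.2.1, st.2.2))
      ((d1, l2, d3) :
        PySem.Dict (Int × Int × Int) (List Int) × List Int × PySem.Dict (Int × Int) Int)) =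
    (l.foldl (fun d p => if pdeg p.2 then d else d.modify (pkey p.2) [] (· ++ [p.1])) d1,
     l.foldl (fun l2 p => if pdeg p.2 then l2 ++ [p.1] else l2) l2,
     l.foldl (fun d p => if pdeg p.2 then d.modify p.2.1 0 (· + 1) else d) d3) := by
  induction l generalizing d1 l2 d3 with
  | nil => rfl
  | cons a t ih =>
    simp only [List.foldl_cons]
    by_cases h : pdeg a.2
    · have hb : (a.2.1.1 == a.2.2.1 && a.2.1.2 == a.2.2.2) = true := h
      rw [if_pos hb, if_pos h, if_pos h, if_pos h, ih]
    · have hb : (a.2.1.1 == a.2.2.1 && a.2.1.2 == a.2.2.2) = false := by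
        simpa [pdeg] using h
      rw [hb]
      simp only [Bool.false_eq_true, if_false]
      rw [if_neg h, if_neg h, if_neg h, ih]
      rfl

theorem alt_eq (segments : List ((Int × Int) × (Int × Int))) :
    find_overlapped_segments_alt segments =
      (PySem.List.pyRange 0 (segments.length : Int) 1).filter
        (fun i => PySem.Set.contains (flag2Of segments) i) := by
  unfold find_overlapped_segments_alt
  dsimp only
  rw [st_eq]
  show (PySem.List.pyRange 0 (segments.length : Int) 1).foldl
      (fun acc i => if PySem.Set.contains (flag2Of segments) i then acc ++ [i] else acc) [] = _
  rw [PySem.List.foldl_append_if_eq_filter, List.nil_append]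

theorem a_eq (segments : List ((Int × Int) × (Int × Int))) :
    find_overlapped_segments segments =
      (PySem.List.pyRange 0 (segments.length : Int) 1).filter
        (fun i => (PySem.List.pyRange 0 (segments.length : Int) 1).any (fun j =>
          j != i && pv_is_segment_overlapped (PySem.List.pyGetD segments i ((0,0),(0,0)))
                                             (PySem.List.pyGetD segments j ((0,0),(0,0))))) := by
  unfold find_overlapped_segments
  dsimp only
  rw [PySem.List.foldl_append_if_eq_filter, List.nil_append]
theorem pv_gcdAux_eq (b a : Nat) : pv_gcdAux a b = Nat.gcd b a := by
  induction b using Nat.strong_induction_on generalizing a with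
  | _ b ih =>
    match b with
    | 0 => simp [pv_gcdAux]
    | Nat.succ b =>
      rw [pv_gcdAux, ih _ (Nat.mod_lt _ (Nat.succ_pos b)), Nat.gcd_rec (b+1) a]

theorem pv_gcd_eq (a b : Int) : pv_gcd a b = (Int.gcd a b : Int) := by
  simp [pv_gcd, pv_gcdAux_eq, Int.gcd, Nat.gcd_comm]

theorem A_on_iff (px py x3 y3 x4 y4 : Int) :
    pv_is_point_on_segment px py x3 y3 x4 y4 = true ↔
      ((min x3 x4 ≤ px ∧ px ≤ max x3 x4 ∧ min y3 y4 ≤ py ∧ py ≤ max y3 y4) ∧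
       (x4 - x3) * (py - y3) = (y4 - y3) * (px - x3)) := by
  unfold pv_is_point_on_segment
  split_ifs with h1 h2 <;> simp_all

theorem B_on_iff (px py x3 y3 x4 y4 : Int) :
    pv_on_nondeg px py x3 y3 x4 y4 = true ↔
      ((px - x3) * (y4 - y3) = (py - y3) * (x4 - x3) ∧
       0 ≤ (px - x3) * (x4 - x3) + (py - y3) * (y4 - y3) ∧
       (px - x3) * (x4 - x3) + (py - y3) * (y4 - y3) ≤
         (x4 - x3) * (x4 - x3) + (y4 - y3) * (y4 - y3)) := by
  unfold pv_on_nondeg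
  dsimp only
  split_ifs with h1 <;> simp_all

theorem btw_iff_dot (u v dx dy : Int) (hc : u * dy = v * dx) (hL : 0 < dx * dx + dy * dy) :
    (((0 ≤ u ∧ u ≤ dx) ∨ (dx ≤ u ∧ u ≤ 0)) ∧ ((0 ≤ v ∧ v ≤ dy) ∨ (dy ≤ v ∧ v ≤ 0))) ↔
      (0 ≤ u * dx + v * dy ∧ u * dx + v * dy ≤ dx * dx + dy * dy) := by
  have hdx : dx * (u * dx + v * dy) = u * (dx * dx + dy * dy) := by linear_combination (-dy) * hc
  have hdy : dy * (u * dx + v * dy) = v * (dx * dx + dy * dy) := by linear_combination dx * hc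
  constructor
  · rintro ⟨hu | hu, hv | hv⟩ <;>
      exact ⟨by nlinarith [hu.1, hu.2, hv.1, hv.2], by nlinarith [hu.1, hu.2, hv.1, hv.2]⟩
  · rintro ⟨h0, h1⟩
    constructor
    · rcases le_total 0 dx with hdx0 | hdx0
      · left
        constructor
        · nlinarith [mul_nonneg hdx0 h0]
        · nlinarith [mul_le_mul_of_nonneg_left h1 hdx0]
      · right
        constructor
        · nlinarith [mul_le_mul_of_nonpos_left h1 hdx0]
        · nlinarith [mul_nonpos_of_nonpos_of_nonneg hdx0 h0]
    · rcases le_total 0 dy with hdy0 | hdy0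
      · left
        constructor
        · nlinarith [mul_nonneg hdy0 h0]
        · nlinarith [mul_le_mul_of_nonneg_left h1 hdy0]
      · right
        constructor
        · nlinarith [mul_le_mul_of_nonpos_left h1 hdy0]
        · nlinarith [mul_nonpos_of_nonpos_of_nonneg hdy0 h0]

theorem on_seg_eq (px py x3 y3 x4 y4 : Int) (h : ¬(x3 = x4 ∧ y3 = y4)) :
    pv_is_point_on_segment px py x3 y3 x4 y4 = pv_on_nondeg px py x3 y3 x4 y4 := by
  rw [Bool.eq_iff_iff, A_on_iff, B_on_iff]
  have hL : 0 < (x4 - x3) * (x4 - x3) + (y4 - y3) * (y4 - y3) := by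
    rcases not_and_or.mp h with h' | h'
    · nlinarith [mul_self_pos.mpr (sub_ne_zero.mpr (fun e : x4 = x3 => h' e.symm)), mul_self_nonneg (y4 - y3)]
    · nlinarith [mul_self_pos.mpr (sub_ne_zero.mpr (fun e : y4 = y3 => h' e.symm)), mul_self_nonneg (x4 - x3)]
  constructor
  · rintro ⟨hb, hcr⟩
    have hc : (px - x3) * (y4 - y3) = (py - y3) * (x4 - x3) := by linarith
    refine ⟨hc, ?_⟩
    rw [← btw_iff_dot _ _ _ _ hc hL]
    rcases le_total x3 x4 with h' | h' <;> rcases le_total y3 y4 with h'' | h'' <;>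
      simp [h', h''] at hb <;> omega
  · rintro ⟨hc, hd⟩
    refine ⟨?_, by linarith⟩
    have := (btw_iff_dot _ _ _ _ hc hL).mpr hd
    rcases le_total x3 x4 with h' | h' <;> rcases le_total y3 y4 with h'' | h'' <;>
      simp [h', h''] <;> omega

theorem A_on_point_iff (px py x3 y3 : Int) :
    pv_is_point_on_segment px py x3 y3 x3 y3 = true ↔ (px = x3 ∧ py = y3) := by
  rw [A_on_iff]
  constructor
  · rintro ⟨⟨h1, h2, h3, h4⟩, -⟩
    simp at h1 h2 h3 h4; omega
  · rintro ⟨rfl, rfl⟩; simp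
def pvOrient (p q : Int) : Prop := 0 < p ∨ (p = 0 ∧ 0 < q)

theorem line_key_char (x1 y1 x2 y2 : Int) (h : ¬(x1 = x2 ∧ y1 = y2)) :
    ∃ s : Int, s ≠ 0 ∧
      x2 - x1 = s * (pv_line_key x1 y1 x2 y2).1 ∧
      y2 - y1 = s * (pv_line_key x1 y1 x2 y2).2.1 ∧
      Int.gcd (pv_line_key x1 y1 x2 y2).1 (pv_line_key x1 y1 x2 y2).2.1 = 1 ∧
      pvOrient (pv_line_key x1 y1 x2 y2).1 (pv_line_key x1 y1 x2 y2).2.1 ∧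
      (pv_line_key x1 y1 x2 y2).2.2 =
        (pv_line_key x1 y1 x2 y2).2.1 * x1 - (pv_line_key x1 y1 x2 y2).1 * y1 := by
  have hne : ¬(x2 - x1 = 0 ∧ y2 - y1 = 0) := by
    rintro ⟨e1, e2⟩; exact h ⟨by omega, by omega⟩
  set dx := x2 - x1 with hdx
  set dy := y2 - y1 with hdy
  have hg : 0 < Int.gcd dx dy := by
    rcases not_and_or.mp hne with h' | h'
    · exact Int.gcd_pos_of_ne_zero_left dy h'
    · exact Int.gcd_pos_of_ne_zero_right dx h'
  have hgi : (0 : Int) < (Int.gcd dx dy : Int) := by exact_mod_cast hg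
  have hfa : PySem.Int.floordiv dx (pv_gcd dx dy) = dx / (Int.gcd dx dy : Int) := by
    rw [pv_gcd_eq, PySem.Int.floordiv_eq_ediv_of_pos hgi]
  have hfb : PySem.Int.floordiv dy (pv_gcd dx dy) = dy / (Int.gcd dx dy : Int) := by
    rw [pv_gcd_eq, PySem.Int.floordiv_eq_ediv_of_pos hgi]
  have hda : (Int.gcd dx dy : Int) * (dx / (Int.gcd dx dy : Int)) = dx :=
    Int.mul_ediv_cancel' (Int.gcd_dvd_left dx dy)
  have hdb : (Int.gcd dx dy : Int) * (dy / (Int.gcd dx dy : Int)) = dy :=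
    Int.mul_ediv_cancel' (Int.gcd_dvd_right dx dy)
  have hcop : Int.gcd (dx / (Int.gcd dx dy : Int)) (dy / (Int.gcd dx dy : Int)) = 1 :=
    Int.gcd_div_gcd_div_gcd hg
  have hab0 : ¬(dx / (Int.gcd dx dy : Int) = 0 ∧ dy / (Int.gcd dx dy : Int) = 0) := by
    rintro ⟨e1, e2⟩
    apply hne
    constructor
    · rw [← hda, e1, mul_zero]
    · rw [← hdb, e2, mul_zero]
  have key_def : pv_line_key x1 y1 x2 y2 =
      (fun ab : Int × Int => (ab.1, ab.2, ab.2 * x1 - ab.1 * y1))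
        (if PySem.Int.floordiv dx (pv_gcd dx dy) < 0 ∨
            (PySem.Int.floordiv dx (pv_gcd dx dy) = 0 ∧ PySem.Int.floordiv dy (pv_gcd dx dy) < 0)
         then (-(PySem.Int.floordiv dx (pv_gcd dx dy)), -(PySem.Int.floordiv dy (pv_gcd dx dy)))
         else (PySem.Int.floordiv dx (pv_gcd dx dy), PySem.Int.floordiv dy (pv_gcd dx dy))) := rfl
  rw [key_def, hfa, hfb]
  set a := dx / (Int.gcd dx dy : Int)
  set b := dy / (Int.gcd dx dy : Int)
  by_cases hflip : a < 0 ∨ (a = 0 ∧ b < 0)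
  · refine ⟨-(Int.gcd dx dy : Int), by omega, ?_⟩
    rw [if_pos hflip]
    dsimp only
    refine ⟨by linear_combination -hda, by linear_combination -hdb, by simpa using hcop, ?_, rfl⟩
    rcases hflip with h' | ⟨h1', h2'⟩
    · exact Or.inl (by omega)
    · exact Or.inr ⟨by omega, by omega⟩
  · refine ⟨(Int.gcd dx dy : Int), by omega, ?_⟩
    rw [if_neg hflip]
    dsimp only
    refine ⟨by linear_combination -hda, by linear_combination -hdb, hcop, ?_, rfl⟩
    rcases lt_trichotomy a 0 with h' | h' | h'
    · exact absurd (Or.inl h') hflip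
    · refine Or.inr ⟨h', ?_⟩
      have hnb : ¬ b < 0 := fun hb => hflip (Or.inr ⟨h', hb⟩)
      have hb0 : b ≠ 0 := fun e => hab0 ⟨h', e⟩
      omega
    · exact Or.inl h'

theorem dir_unique (p q p' q' : Int) (h1 : Int.gcd p q = 1) (h2 : Int.gcd p' q' = 1)
    (hcross : p * q' = q * p') (ho1 : pvOrient p q) (ho2 : pvOrient p' q') :
    p = p' ∧ q = q' := by
  have cop1 : IsCoprime p q := Int.isCoprime_iff_gcd_eq_one.mpr h1
  have cop2 : IsCoprime p' q' := Int.isCoprime_iff_gcd_eq_one.mpr h2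
  have d1 : p ∣ p' := by
    have h' : p ∣ q * p' := ⟨q', hcross.symm⟩
    exact cop1.dvd_of_dvd_mul_left h'
  have d2 : p' ∣ p := by
    have h' : p' ∣ p * q' := ⟨q, by linear_combination hcross⟩
    exact cop2.dvd_of_dvd_mul_right h'
  have habs : p.natAbs = p'.natAbs :=
    Nat.dvd_antisymm (Int.natAbs_dvd_natAbs.mpr d1) (Int.natAbs_dvd_natAbs.mpr d2)
  by_cases hp0 : p = 0
  · have hp'0 : p' = 0 := by
      have := habs; rw [hp0] at this; omega
    have hq : q = 1 := by
      have : q.natAbs = 1 := by simpa [hp0, Int.gcd] using h1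
      rcases ho1 with h' | ⟨-, h'⟩
      · omega
      · omega
    have hq' : q' = 1 := by
      have : q'.natAbs = 1 := by simpa [hp'0, Int.gcd] using h2
      rcases ho2 with h' | ⟨-, h'⟩
      · omega
      · omega
    exact ⟨by rw [hp0, hp'0], by rw [hq, hq']⟩
  · have hp : 0 < p := by
      rcases ho1 with h' | ⟨h', -⟩
      · exact h'
      · exact absurd h' hp0
    have hp' : 0 < p' := by
      have hp'0 : p' ≠ 0 := by intro e; rw [e] at habs; simp at habs; omega
      rcases ho2 with h' | ⟨h', -⟩
      · exact h'
      · exact absurd h' hp'0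
    have hpp : p = p' := by omega
    refine ⟨hpp, ?_⟩
    have : p * q' = p * q := by rw [hcross, hpp]; ring
    have := mul_left_cancel₀ hp0 this
    omega

theorem overlapped_key_eq (x1 y1 x2 y2 x3 y3 x4 y4 : Int)
    (h1 : ¬(x1 = x2 ∧ y1 = y2)) (h2 : ¬(x3 = x4 ∧ y3 = y4))
    (e1 : (x4 - x3) * (y1 - y3) = (y4 - y3) * (x1 - x3))
    (e2 : (x4 - x3) * (y2 - y3) = (y4 - y3) * (x2 - x3)) :
    pv_line_key x1 y1 x2 y2 = pv_line_key x3 y3 x4 y4 := by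
  obtain ⟨s, hs, hsx, hsy, hg1, ho1, hc1⟩ := line_key_char x1 y1 x2 y2 h1
  obtain ⟨t, ht, htx, hty, hg2, ho2, hc2⟩ := line_key_char x3 y3 x4 y4 h2
  set p := (pv_line_key x1 y1 x2 y2).1
  set q := (pv_line_key x1 y1 x2 y2).2.1
  set p' := (pv_line_key x3 y3 x4 y4).1
  set q' := (pv_line_key x3 y3 x4 y4).2.1
  have hcross0 : (x2 - x1) * (y4 - y3) = (y2 - y1) * (x4 - x3) := by linarith [e1, e2]
  have hcross : p * q' = q * p' := by
    have h' : s * t * (p * q') = s * t * (q * p') := by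
      have := hcross0
      rw [hsx, hsy, htx, hty] at this
      ring_nf at this ⊢
      linarith [this]
    exact mul_left_cancel₀ (mul_ne_zero hs ht) h'
  obtain ⟨hpp, hqq⟩ := dir_unique p q p' q' hg1 hg2 hcross ho1 ho2
  have hline : q * x1 - p * y1 = q' * x3 - p' * y3 := by
    rw [← hpp, ← hqq]
    have h' : t * (p * (y1 - y3)) = t * (q * (x1 - x3)) := by
      have := e1
      rw [htx, hty, ← hpp, ← hqq] at this
      ring_nf at this ⊢
      linarith [this]
    have := mul_left_cancel₀ ht h'
    linarith [this]
  have e3 : (pv_line_key x1 y1 x2 y2).2.2 = (pv_line_key x3 y3 x4 y4).2.2 := by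
    rw [hc1, hc2, hline]
  exact Prod.ext hpp (Prod.ext hqq e3)

-- membership in an 'add if' set-building fold
theorem mem_foldl_addif1 (l : List Int) (cond : Int → Bool) (s : PySem.Set Int) (x : Int) :
    (x ∈ l.foldl (fun fl i => if cond i then PySem.Set.add fl i else fl) s) ↔
      x ∈ s ∨ (x ∈ l ∧ cond x = true) := by
  induction l generalizing s with
  | nil => simp
  | cons a t ih =>
    simp only [List.foldl_cons]
    by_cases h : cond a
    · rw [if_pos h, ih]
      constructor
      · rintro (hm | ⟨hx, hc⟩)
        · rcases (PySem.Set.mem_add s a x).mp hm with hm | rfl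
          · exact Or.inl hm
          · exact Or.inr ⟨List.mem_cons_self, h⟩
        · exact Or.inr ⟨List.mem_cons_of_mem _ hx, hc⟩
      · rintro (hm | ⟨hx, hc⟩)
        · exact Or.inl ((PySem.Set.mem_add s a x).mpr (Or.inl hm))
        · rcases List.mem_cons.mp hx with rfl | hx
          · exact Or.inl ((PySem.Set.mem_add s x x).mpr (Or.inr rfl))
          · exact Or.inr ⟨hx, hc⟩
    · rw [if_neg h, ih]
      constructor
      · rintro (hm | ⟨hx, hc⟩)
        · exact Or.inl hm
        · exact Or.inr ⟨List.mem_cons_of_mem _ hx, hc⟩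
      · rintro (hm | ⟨hx, hc⟩)
        · exact Or.inl hm
        · rcases List.mem_cons.mp hx with rfl | hx
          · exact absurd hc h
          · exact Or.inr ⟨hx, hc⟩

theorem mem_foldl_addif2 (l : List Int) (c1 : Int → Prop) [DecidablePred c1] (c2 : Int → Bool)
    (s : PySem.Set Int) (x : Int) :
    (x ∈ l.foldl (fun fl i => if c1 i then PySem.Set.add fl i
                              else if c2 i then PySem.Set.add fl i else fl) s) ↔
      x ∈ s ∨ (x ∈ l ∧ (c1 x ∨ c2 x = true)) := by
  have h : ∀ fl i, (if c1 i then PySem.Set.add fl i else if c2 i then PySem.Set.add fl i else fl)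
      = if decide (c1 i) || c2 i then PySem.Set.add fl i else fl := by
    intro fl i
    by_cases h1 : c1 i <;> by_cases h2 : c2 i <;> simp [h1, h2]
  rw [PySem.List.foldl_congr_mem _ _ _ _ (fun acc y _ => h acc y), mem_foldl_addif1]
  simp

theorem mem_foldl_addif_nested (L : List (List Int)) (cond : List Int → Int → Bool)
    (s : PySem.Set Int) (x : Int) :
    (x ∈ L.foldl (fun fl idxs =>
        idxs.foldl (fun fl i => if cond idxs i then PySem.Set.add fl i else fl) fl) s) ↔
      x ∈ s ∨ ∃ idxs ∈ L, x ∈ idxs ∧ cond idxs x = true := by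
  induction L generalizing s with
  | nil => simp
  | cons a t ih =>
    simp only [List.foldl_cons]
    rw [ih, mem_foldl_addif1]
    constructor
    · rintro ((hm | ⟨hx, hc⟩) | ⟨idxs, hi, hx, hc⟩)
      · exact Or.inl hm
      · exact Or.inr ⟨a, List.mem_cons_self, hx, hc⟩
      · exact Or.inr ⟨idxs, List.mem_cons_of_mem _ hi, hx, hc⟩
    · rintro (hm | ⟨idxs, hi, hx, hc⟩)
      · exact Or.inl (Or.inl hm)
      · rcases List.mem_cons.mp hi with rfl | hi
        · exact Or.inl (Or.inr ⟨hx, hc⟩)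
        · exact Or.inr ⟨idxs, hi, hx, hc⟩

theorem mem_pEn (segments : List ((Int × Int) × (Int × Int))) (p : Int × ((Int × Int) × (Int × Int))) :
    p ∈ pEn segments ↔ ∃ m : Nat, ∃ h : m < segments.length, p = (↑m, segments[m]) := by
  unfold pEn
  rw [PySem.List.mem_enumerate_iff]
  simp

theorem grp_alt (segments : List ((Int × Int) × (Int × Int))) :
    groupsOf segments =
      ((pEn segments).filter (fun p => !pdeg p.2)).foldl
        (fun d p => d.modify (pkey p.2) [] (· ++ [p.1])) PySem.Dict.empty := by
  unfold groupsOf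
  rw [PySem.List.foldl_congr_mem _ _
      (fun d p => if !pdeg p.2 then d.modify (pkey p.2) [] (· ++ [p.1]) else d) _
      (by intro acc x _; by_cases h : pdeg x.2 <;> simp [h])]
  rw [PySem.List.foldl_if_eq_foldl_filter]

theorem grp_getD (segments : List ((Int × Int) × (Int × Int))) (K : Int × Int × Int) :
    (groupsOf segments).getD K [] =
      ((((pEn segments).filter (fun p => !pdeg p.2)).map (fun p => (pkey p.2, p.1))).filter
        (fun q => q.1 == K)).map (fun q => q.2) := by
  rw [grp_alt]
  have hmap := List.foldl_map (f := fun p : Int × ((Int × Int) × (Int × Int)) => (pkey p.2, p.1))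
      (g := fun (d : PySem.Dict (Int × Int × Int) (List Int)) q => d.modify q.1 [] (· ++ [q.2]))
      (l := (pEn segments).filter (fun p => !pdeg p.2)) (init := PySem.Dict.empty)
  rw [← hmap]
  rw [PySem.Dict.getD_foldl_modify_append]
  simp [pysem]

theorem keys_mem (segments : List ((Int × Int) × (Int × Int))) (K : Int × Int × Int) :
    K ∈ (groupsOf segments).keys ↔
      ∃ m : Nat, ∃ h : m < segments.length, pdeg segments[m] = false ∧ pkey segments[m] = K := by
  rw [grp_alt, PySem.Dict.keys_foldl_modify_key]
  have : PySem.Set.update (PySem.Dict.empty : PySem.Dict (Int × Int × Int) (List Int)).keys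
      (((pEn segments).filter (fun p => !pdeg p.2)).map (fun p => pkey p.2)) =
      PySem.Set.ofList (((pEn segments).filter (fun p => !pdeg p.2)).map (fun p => pkey p.2)) := by
    rw [PySem.Set.ofList_eq_foldl]; rfl
  rw [this, PySem.Set.mem_ofList]
  simp only [List.mem_map, List.mem_filter, Bool.not_eq_true']
  constructor
  · rintro ⟨p, ⟨hp, hnd⟩, rfl⟩
    obtain ⟨m, hm, rfl⟩ := (mem_pEn segments p).mp hp
    exact ⟨m, hm, hnd, rfl⟩
  · rintro ⟨m, hm, hnd, rfl⟩
    exact ⟨((m : Int), segments[m]), ⟨(mem_pEn segments _).mpr ⟨m, hm, rfl⟩, hnd⟩, rfl⟩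

theorem nodup_keys (segments : List ((Int × Int) × (Int × Int))) :
    (groupsOf segments).keys.Nodup := by
  rw [grp_alt]
  exact PySem.Dict.nodup_keys_foldl_modify_key _ _ _ _ _ (by simp [PySem.Dict.empty, PySem.Dict.keys])

theorem values_mem (segments : List ((Int × Int) × (Int × Int))) (L : List Int) :
    L ∈ (groupsOf segments).values ↔
      ∃ K ∈ (groupsOf segments).keys, L = (groupsOf segments).getD K [] := by
  rw [PySem.Dict.values_eq_map_keys _ (nodup_keys segments) []]
  simp only [List.mem_map]
  constructor
  · rintro ⟨K, hK, rfl⟩; exact ⟨K, hK, rfl⟩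
  · rintro ⟨K, hK, rfl⟩; exact ⟨K, hK, rfl⟩

theorem ptIdx_eq (segments : List ((Int × Int) × (Int × Int))) :
    ptIdxOf segments = ((pEn segments).filter (fun p => pdeg p.2)).map (fun p => p.1) := by
  unfold ptIdxOf
  have h := PySem.List.foldl_append_if (fun p : Int × ((Int × Int) × (Int × Int)) => pdeg p.2)
      (fun p => p.1) (pEn segments) []
  exact h.trans (List.nil_append _)

theorem mem_ptIdx (segments : List ((Int × Int) × (Int × Int))) (k : Nat)
    (hk : k < segments.length) :
    ((k : Int) ∈ ptIdxOf segments) ↔ pdeg segments[k] = true := by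
  rw [ptIdx_eq]
  simp only [List.mem_map, List.mem_filter]
  constructor
  · rintro ⟨p, ⟨hp, hd⟩, hp1⟩
    obtain ⟨m, hm, rfl⟩ := (mem_pEn segments p).mp hp
    simp only at hp1 hd
    have : m = k := by exact_mod_cast hp1
    subst this
    exact hd
  · intro hd
    exact ⟨((k : Int), segments[k]), ⟨(mem_pEn segments _).mpr ⟨k, hk, rfl⟩, hd⟩, rfl⟩

theorem cnt_eq (segments : List ((Int × Int) × (Int × Int))) (c : Int × Int) :
    (ptCntOf segments).getD c 0 =
      (List.count c (((pEn segments).filter (fun p => pdeg p.2)).map (fun p => p.2.1)) : Int) := by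
  unfold ptCntOf
  rw [PySem.List.foldl_if_eq_foldl_filter]
  have hmap := List.foldl_map (f := fun p : Int × ((Int × Int) × (Int × Int)) => p.2.1)
      (g := fun (d : PySem.Dict (Int × Int) Int) x => d.modify x 0 (· + 1))
      (l := (pEn segments).filter (fun p => pdeg p.2)) (init := PySem.Dict.empty)
  rw [← hmap]
  rw [PySem.Dict.getD_foldl_modify_add_one]
  simp [pysem]

theorem two_le_length_iff (l : List (Int × ((Int × Int) × (Int × Int)))) (e : Int × ((Int × Int) × (Int × Int)))
    (hnd : (l.map Prod.fst).Nodup) (he : e ∈ l) :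
    2 ≤ l.length ↔ ∃ e' ∈ l, e'.1 ≠ e.1 := by
  rcases l with _ | ⟨a, l1⟩
  · simp at he
  · rcases l1 with _ | ⟨b, t⟩
    · simp only [List.mem_singleton] at he
      subst he
      constructor
      · intro h; simp at h
      · rintro ⟨e', he', hne⟩
        simp only [List.mem_singleton] at he'
        subst he'
        exact absurd rfl hne
    · constructor
      · intro _
        have hab : a.1 ≠ b.1 := by
          simp only [List.map_cons, List.nodup_cons, List.mem_cons, List.mem_map] at hnd
          exact fun h => hnd.1 (Or.inl h)
        by_cases ha : a.1 = e.1
        · exact ⟨b, List.mem_cons_of_mem _ List.mem_cons_self, fun h => hab (ha.trans h.symm)⟩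
        · exact ⟨a, List.mem_cons_self, ha⟩
      · intro _
        simp only [List.length_cons]
        omega

theorem pdeg_eq (s : (Int × Int) × (Int × Int)) : pdeg s = true ↔ s.1 = s.2 := by
  simp [pdeg, Prod.ext_iff]

theorem ov_iff (s t : (Int × Int) × (Int × Int)) : pv_is_segment_overlapped s t = true ↔
    (pv_is_point_on_segment s.1.1 s.1.2 t.1.1 t.1.2 t.2.1 t.2.2 = true ∧
     pv_is_point_on_segment s.2.1 s.2.2 t.1.1 t.1.2 t.2.1 t.2.2 = true) := by
  simp [pv_is_segment_overlapped]

theorem pdeg_false_ne (s : (Int × Int) × (Int × Int)) (hs : pdeg s = false) :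
    ¬(s.1.1 = s.2.1 ∧ s.1.2 = s.2.2) := by
  rintro ⟨e1, e2⟩
  simp [pdeg, e1, e2] at hs

theorem ov_iff_B (s t : (Int × Int) × (Int × Int)) (ht : pdeg t = false) :
    pv_is_segment_overlapped s t = true ↔
      (pv_on_nondeg s.1.1 s.1.2 t.1.1 t.1.2 t.2.1 t.2.2 = true ∧
       pv_on_nondeg s.2.1 s.2.2 t.1.1 t.1.2 t.2.1 t.2.2 = true) := by
  rw [ov_iff, on_seg_eq _ _ _ _ _ _ (pdeg_false_ne t ht), on_seg_eq _ _ _ _ _ _ (pdeg_false_ne t ht)]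

theorem ov_deg_iff (s t : (Int × Int) × (Int × Int)) (ht : pdeg t = true) :
    pv_is_segment_overlapped s t = true ↔ (s.1 = t.1 ∧ s.2 = t.1) := by
  have h1 : t.2.1 = t.1.1 := by simp [pdeg] at ht; omega
  have h2 : t.2.2 = t.1.2 := by simp [pdeg] at ht; omega
  rw [ov_iff, h1, h2, A_on_point_iff, A_on_point_iff]
  simp [Prod.ext_iff]

theorem ov_nondeg_deg (s t : (Int × Int) × (Int × Int)) (hs : pdeg s = false) (ht : pdeg t = true) :
    ¬ pv_is_segment_overlapped s t = true := by
  intro h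
  obtain ⟨h1, h2⟩ := (ov_deg_iff s t ht).mp h
  have he : s.1 = s.2 := h1.trans h2.symm
  rw [(pdeg_eq s).mpr he] at hs
  exact Bool.noConfusion hs

theorem ov_key_eq (s t : (Int × Int) × (Int × Int)) (hs : pdeg s = false) (ht : pdeg t = false)
    (h : pv_is_segment_overlapped s t = true) : pkey s = pkey t := by
  obtain ⟨h1, h2⟩ := (ov_iff s t).mp h
  have e1 := ((A_on_iff _ _ _ _ _ _).mp h1).2
  have e2 := ((A_on_iff _ _ _ _ _ _).mp h2).2
  exact overlapped_key_eq s.1.1 s.1.2 s.2.1 s.2.2 t.1.1 t.1.2 t.2.1 t.2.2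
    (pdeg_false_ne s hs) (pdeg_false_ne t ht) e1 e2

theorem pyGetD_idx (segments : List ((Int × Int) × (Int × Int))) (m : Nat) (hm : m < segments.length) :
    PySem.List.pyGetD segments (m : Int) ((0,0),(0,0)) = segments[m] := by
  rw [PySem.List.pyGetD_natCast]
  simp [List.getD, List.getElem?_eq_getElem hm]

theorem mem_group_elt (segments : List ((Int × Int) × (Int × Int))) (K : Int × Int × Int) (x : Int)
    (hx : x ∈ (groupsOf segments).getD K []) :
    ∃ m : Nat, ∃ hm : m < segments.length, x = (m : Int) ∧ pdeg segments[m] = false ∧ pkey segments[m] = K := by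
  rw [grp_getD] at hx
  simp only [List.mem_map, List.mem_filter, beq_iff_eq, Bool.not_eq_true'] at hx
  obtain ⟨q, ⟨⟨p, ⟨hp, hnd⟩, rfl⟩, hKq⟩, hq2⟩ := hx
  obtain ⟨m, hm, rfl⟩ := (mem_pEn segments p).mp hp
  simp only at hKq hq2 hnd
  exact ⟨m, hm, hq2.symm, hnd, hKq⟩

theorem mem_group_intro (segments : List ((Int × Int) × (Int × Int))) (m : Nat)
    (hm : m < segments.length) (hnd : pdeg segments[m] = false) (K : Int × Int × Int)
    (hK : pkey segments[m] = K) : (m : Int) ∈ (groupsOf segments).getD K [] := by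
  rw [grp_getD]
  simp only [List.mem_map, List.mem_filter, beq_iff_eq, Bool.not_eq_true']
  exact ⟨(pkey segments[m], (m : Int)), ⟨⟨((m : Int), segments[m]),
    ⟨(mem_pEn segments _).mpr ⟨m, hm, rfl⟩, hnd⟩, rfl⟩, hK⟩, rfl⟩

theorem group_mem_values (segments : List ((Int × Int) × (Int × Int))) (m : Nat)
    (hm : m < segments.length) (hnd : pdeg segments[m] = false) :
    (groupsOf segments).getD (pkey segments[m]) [] ∈ (groupsOf segments).values :=
  (values_mem segments _).mpr ⟨pkey segments[m], (keys_mem segments _).mpr ⟨m, hm, hnd, rfl⟩, rfl⟩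

theorem flag1_iff (segments : List ((Int × Int) × (Int × Int))) (k : Nat) (hk : k < segments.length) :
    ((k : Int) ∈ flag1Of segments) ↔
      (pdeg segments[k] = false ∧
        ∃ m : Nat, ∃ hm : m < segments.length, m ≠ k ∧ pdeg segments[m] = false ∧
          pkey segments[m] = pkey segments[k] ∧
          pv_on_nondeg segments[k].1.1 segments[k].1.2 segments[m].1.1 segments[m].1.2 segments[m].2.1 segments[m].2.2 = true ∧
          pv_on_nondeg segments[k].2.1 segments[k].2.2 segments[m].1.1 segments[m].1.2 segments[m].2.1 segments[m].2.2 = true) := by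
  have h : ((k : Int) ∈ flag1Of segments) ↔
      (k : Int) ∈ (PySem.Set.empty : PySem.Set Int) ∨
        ∃ idxs ∈ (groupsOf segments).values, (k : Int) ∈ idxs ∧
          (idxs.any (fun j =>
            let t := PySem.List.pyGetD segments j ((0,0),(0,0))
            j != (k : Int) && pv_on_nondeg (PySem.List.pyGetD segments (k : Int) ((0,0),(0,0))).1.1
                  (PySem.List.pyGetD segments (k : Int) ((0,0),(0,0))).1.2 t.1.1 t.1.2 t.2.1 t.2.2
               && pv_on_nondeg (PySem.List.pyGetD segments (k : Int) ((0,0),(0,0))).2.1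
                  (PySem.List.pyGetD segments (k : Int) ((0,0),(0,0))).2.2 t.1.1 t.1.2 t.2.1 t.2.2)) = true :=
    mem_foldl_addif_nested (groupsOf segments).values _ PySem.Set.empty (k : Int)
  rw [h]
  simp only [PySem.Set.empty]
  rw [pyGetD_idx segments k hk]
  constructor
  · rintro (hm | ⟨idxs, hidxs, hkmem, hcond⟩)
    · simp at hm
    · obtain ⟨K, hK, rfl⟩ := (values_mem segments idxs).mp hidxs
      obtain ⟨k', hk', hkk, hknd, hkkey⟩ := mem_group_elt segments K _ hkmem
      have hk'' : k' = k := by exact_mod_cast hkk.symm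
      subst hk''
      refine ⟨hknd, ?_⟩
      obtain ⟨j, hj, htest⟩ := List.any_eq_true.mp hcond
      obtain ⟨m, hm, rfl, hmnd, hmkey⟩ := mem_group_elt segments K _ hj
      simp only [pyGetD_idx segments m hm, Bool.and_eq_true, bne_iff_ne] at htest
      obtain ⟨⟨hne, ht1⟩, ht2⟩ := htest
      exact ⟨m, hm, by exact_mod_cast hne, hmnd, hmkey.trans hkkey.symm, ht1, ht2⟩
  · rintro ⟨hknd, m, hm, hne, hmnd, hmkey, ht1, ht2⟩
    refine Or.inr ⟨(groupsOf segments).getD (pkey segments[k]) [],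
      ?_, mem_group_intro segments k hk hknd _ rfl, ?_⟩
    · have := group_mem_values segments m hm hmnd
      rwa [hmkey] at this
    · refine List.any_eq_true.mpr ⟨(m : Int), mem_group_intro segments m hm hmnd _ hmkey, ?_⟩
      simp only [pyGetD_idx segments m hm, Bool.and_eq_true, bne_iff_ne]
      exact ⟨⟨by exact_mod_cast hne, ht1⟩, ht2⟩

theorem c2_iff (segments : List ((Int × Int) × (Int × Int))) (c : Int × Int) :
    ((groupsOf segments).values.any (fun idxs => idxs.any (fun j =>
        let t := PySem.List.pyGetD segments j ((0,0),(0,0))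
        pv_on_nondeg c.1 c.2 t.1.1 t.1.2 t.2.1 t.2.2)) = true) ↔
      ∃ m : Nat, ∃ hm : m < segments.length, pdeg segments[m] = false ∧
        pv_on_nondeg c.1 c.2 segments[m].1.1 segments[m].1.2 segments[m].2.1 segments[m].2.2 = true := by
  rw [List.any_eq_true]
  constructor
  · rintro ⟨idxs, hidxs, hany⟩
    obtain ⟨K, hK, rfl⟩ := (values_mem segments idxs).mp hidxs
    obtain ⟨j, hj, htest⟩ := List.any_eq_true.mp hany
    obtain ⟨m, hm, rfl, hmnd, -⟩ := mem_group_elt segments K _ hj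
    rw [pyGetD_idx segments m hm] at htest
    exact ⟨m, hm, hmnd, htest⟩
  · rintro ⟨m, hm, hmnd, htest⟩
    refine ⟨(groupsOf segments).getD (pkey segments[m]) [], group_mem_values segments m hm hmnd,
      List.any_eq_true.mpr ⟨(m : Int), mem_group_intro segments m hm hmnd _ rfl, ?_⟩⟩
    rw [pyGetD_idx segments m hm]
    exact htest

theorem c1_iff (segments : List ((Int × Int) × (Int × Int))) (k : Nat) (hk : k < segments.length)
    (hdeg : pdeg segments[k] = true) :
    (2 ≤ (ptCntOf segments).getD segments[k].1 0) ↔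
      ∃ m : Nat, ∃ hm : m < segments.length, m ≠ k ∧ pdeg segments[m] = true ∧
        segments[m].1 = segments[k].1 := by
  rw [cnt_eq]
  set l' := ((pEn segments).filter (fun p => pdeg p.2)).filter (fun p => p.2.1 == segments[k].1) with hl'
  have hcount : List.count segments[k].1
      (((pEn segments).filter (fun p => pdeg p.2)).map (fun p => p.2.1)) = l'.length := by
    rw [List.count_eq_countP, List.countP_map, hl', List.countP_eq_length_filter]
    rfl
  have hsub : l'.Sublist (pEn segments) := (List.filter_sublist).trans (List.filter_sublist)
  have hnd : (l'.map Prod.fst).Nodup := by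
    have hpw : l'.Pairwise (fun p q => p.1 < q.1) :=
      List.Pairwise.sublist hsub (PySem.List.pairwise_lt_enumerate segments 0)
    exact (List.pairwise_map.mpr hpw).imp ne_of_lt
  have hkmem : ((k : Int), segments[k]) ∈ l' := by
    rw [hl']
    simp only [List.mem_filter, beq_iff_eq]
    exact ⟨⟨(mem_pEn segments _).mpr ⟨k, hk, rfl⟩, hdeg⟩, by trivial⟩
  have h2 : (2 ≤ l'.length) ↔ ∃ e' ∈ l', e'.1 ≠ (k : Int) :=
    two_le_length_iff l' _ hnd hkmem
  rw [hcount]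
  constructor
  · intro hle
    obtain ⟨e', he', hne⟩ := h2.mp (by exact_mod_cast hle)
    have he'2 := he'
    rw [hl'] at he'2
    simp only [List.mem_filter, beq_iff_eq] at he'2
    obtain ⟨⟨hpen, hd⟩, hc⟩ := he'2
    obtain ⟨m, hm, rfl⟩ := (mem_pEn segments e').mp hpen
    exact ⟨m, hm, fun e => hne (by simp [e]), hd, hc⟩
  · rintro ⟨m, hm, hne, hd, hc⟩
    have hmmem : ((m : Int), segments[m]) ∈ l' := by
      rw [hl']
      simp only [List.mem_filter, beq_iff_eq]
      exact ⟨⟨(mem_pEn segments _).mpr ⟨m, hm, rfl⟩, hd⟩, hc⟩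
    have : 2 ≤ l'.length := h2.mpr ⟨((m : Int), segments[m]), hmmem, fun e => hne (Nat.cast_inj.mp (show ((m : Nat) : Int) = ((k : Nat) : Int) from e))⟩
    exact_mod_cast this

theorem flag2_iff (segments : List ((Int × Int) × (Int × Int))) (k : Nat) (hk : k < segments.length) :
    ((k : Int) ∈ flag2Of segments) ↔
      ∃ m : Nat, ∃ hm : m < segments.length, m ≠ k ∧
        pv_is_segment_overlapped segments[k] segments[m] = true := by
  have hmem' : ((k : Int) ∈ flag2Of segments) ↔
      ((k : Int) ∈ flag1Of segments) ∨ (((k : Int) ∈ ptIdxOf segments) ∧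
        ((2 ≤ (ptCntOf segments).getD ((PySem.List.pyGetD segments (k : Int) ((0,0),(0,0))).1) 0) ∨
         ((groupsOf segments).values.any (fun idxs => idxs.any (fun j =>
            let t := PySem.List.pyGetD segments j ((0,0),(0,0))
            pv_on_nondeg (PySem.List.pyGetD segments (k : Int) ((0,0),(0,0))).1.1
              (PySem.List.pyGetD segments (k : Int) ((0,0),(0,0))).1.2 t.1.1 t.1.2 t.2.1 t.2.2))) = true)) :=
    mem_foldl_addif2 (ptIdxOf segments)
      (fun i => 2 ≤ (ptCntOf segments).getD ((PySem.List.pyGetD segments i ((0,0),(0,0))).1) 0)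
      (fun i => (groupsOf segments).values.any (fun idxs => idxs.any (fun j =>
          let t := PySem.List.pyGetD segments j ((0,0),(0,0))
          pv_on_nondeg (PySem.List.pyGetD segments i ((0,0),(0,0))).1.1
            (PySem.List.pyGetD segments i ((0,0),(0,0))).1.2 t.1.1 t.1.2 t.2.1 t.2.2)))
      (flag1Of segments) (k : Int)
  rw [pyGetD_idx segments k hk] at hmem'
  rw [hmem', mem_ptIdx segments k hk]
  by_cases hdeg : pdeg segments[k] = true
  · have hflag1 : ¬((k : Int) ∈ flag1Of segments) := by
      rw [flag1_iff segments k hk]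
      rintro ⟨hnd, -⟩
      rw [hdeg] at hnd
      exact absurd hnd (by simp)
    have hkk := (pdeg_eq _).mp hdeg
    constructor
    · rintro (h1 | ⟨-, hc⟩)
      · exact absurd h1 hflag1
      · rcases hc with hc1 | hc2
        · obtain ⟨m, hm, hne, hd, hcoord⟩ := (c1_iff segments k hk hdeg).mp hc1
          refine ⟨m, hm, hne, ?_⟩
          rw [ov_deg_iff _ _ hd]
          exact ⟨hcoord.symm, by rw [← hkk]; exact hcoord.symm⟩
        · obtain ⟨m, hm, hmnd, htest⟩ := (c2_iff segments segments[k].1).mp hc2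
          have hne : m ≠ k := by
            rintro rfl
            exact Bool.noConfusion (hdeg.symm.trans hmnd)
          refine ⟨m, hm, hne, ?_⟩
          rw [ov_iff_B _ _ hmnd]
          exact ⟨htest, by rw [← hkk]; exact htest⟩
    · rintro ⟨m, hm, hne, hov⟩
      refine Or.inr ⟨hdeg, ?_⟩
      by_cases hmd : pdeg segments[m] = true
      · left
        apply (c1_iff segments k hk hdeg).mpr
        obtain ⟨h1, h2⟩ := (ov_deg_iff _ _ hmd).mp hov
        exact ⟨m, hm, hne, hmd, h1.symm⟩
      · right
        apply (c2_iff segments segments[k].1).mpr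
        have hmnd : pdeg segments[m] = false := by simpa using hmd
        obtain ⟨h1, h2⟩ := (ov_iff_B _ _ hmnd).mp hov
        exact ⟨m, hm, hmnd, h1⟩
  · have hdeg' : pdeg segments[k] = false := by simpa using hdeg
    rw [flag1_iff segments k hk]
    constructor
    · rintro (⟨-, m, hm, hne, hmnd, hkey, ht1, ht2⟩ | ⟨hdT, -⟩)
      · refine ⟨m, hm, hne, ?_⟩
        rw [ov_iff_B _ _ hmnd]
        exact ⟨ht1, ht2⟩
      · exact absurd hdT hdeg
    · rintro ⟨m, hm, hne, hov⟩
      left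
      have hmnd : pdeg segments[m] = false := by
        by_contra h
        exact ov_nondeg_deg _ _ hdeg' (by simpa using h) hov
      obtain ⟨ht1, ht2⟩ := (ov_iff_B _ _ hmnd).mp hov
      exact ⟨hdeg', m, hm, hne, hmnd, (ov_key_eq _ _ hdeg' hmnd hov).symm, ht1, ht2⟩

theorem final_eq (segments : List ((Int × Int) × (Int × Int))) :
    find_overlapped_segments segments = find_overlapped_segments_alt segments := by
  rw [a_eq, alt_eq]
  refine List.filter_congr ?_
  intro x hx
  rw [PySem.List.mem_pyRange_one] at hx
  obtain ⟨k, rfl⟩ : ∃ k : Nat, x = (k : Int) := ⟨x.toNat, (Int.toNat_of_nonneg hx.1).symm⟩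
  have hk : k < segments.length := by exact_mod_cast hx.2
  rw [Bool.eq_iff_iff, List.any_eq_true,
      show (PySem.Set.contains (flag2Of segments) (k : Int) = true) ↔ ((k : Int) ∈ flag2Of segments)
        from by simp [PySem.Set.contains],
      flag2_iff segments k hk]
  constructor
  · rintro ⟨j, hj, hcond⟩
    rw [PySem.List.mem_pyRange_one] at hj
    obtain ⟨m, rfl⟩ : ∃ m : Nat, j = (m : Int) := ⟨j.toNat, (Int.toNat_of_nonneg hj.1).symm⟩
    have hm : m < segments.length := by exact_mod_cast hj.2
    simp only [Bool.and_eq_true, bne_iff_ne] at hcond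
    obtain ⟨hne, hov⟩ := hcond
    rw [pyGetD_idx segments k hk, pyGetD_idx segments m hm] at hov
    exact ⟨m, hm, fun e => hne (by exact_mod_cast congrArg (Nat.cast : Nat → Int) e), hov⟩
  · rintro ⟨m, hm, hne, hov⟩
    refine ⟨(m : Int), PySem.List.mem_pyRange_one.mpr ⟨Int.natCast_nonneg m, by exact_mod_cast hm⟩, ?_⟩
    simp only [Bool.and_eq_true, bne_iff_ne]
    rw [pyGetD_idx segments k hk, pyGetD_idx segments m hm]
    exact ⟨fun e => hne (by exact_mod_cast e), hov⟩

-- ===== VERDICT (by name: the statement is the Claim_ definition above) =====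
theorem find_overlapped_segments_spec : Claim_equal_find_overlapped_segments := by
  intro segments _
  exact final_eq segments
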